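-- pv_equiv track=rewrite | github.com/Hensonam23/self-learning-ai | tools/run_autoupgrade.py | topic_to_file
-- ===== SOURCE A (Python) =====
-- def norm(s):
--     return " ".join(s.strip().lower().split())
--
-- def topic_to_file(topic):
--     t = norm(topic).replace(" ", "_")
--     out = "".join(ch for ch in t if ch.isalnum() or ch == "_")
--     while "__" in out:
--         out = out.replace("__", "_")
--     out = out.strip("_")
--     if not out:
--         out = "untitled"
--     return out + ".txt"
-- ===== SOURCE B (Python) =====
-- def topic_to_file(topic):
--     cleaned = []
--     for ch in topic.lower():
--         if ch.isalnum():
--             cleaned.append(ch)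
--         elif ch == "_" or ch.isspace():
--             cleaned.append(" ")
--     out = "_".join("".join(cleaned).split())
--     return (out or "untitled") + ".txt"
-- ===== Notes on version B (the rewrite author's own statement) =====
-- stated objective: simpler
-- what changed: B replaces A's character filter followed by a repeated-replacement while-loop and an underscore strip with a single classification pass that rewrites every separator character (whitespace or underscore) to a space and drops other non-alphanumerics, then one split()/join collapses and trims the separators.
import Mathlib
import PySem

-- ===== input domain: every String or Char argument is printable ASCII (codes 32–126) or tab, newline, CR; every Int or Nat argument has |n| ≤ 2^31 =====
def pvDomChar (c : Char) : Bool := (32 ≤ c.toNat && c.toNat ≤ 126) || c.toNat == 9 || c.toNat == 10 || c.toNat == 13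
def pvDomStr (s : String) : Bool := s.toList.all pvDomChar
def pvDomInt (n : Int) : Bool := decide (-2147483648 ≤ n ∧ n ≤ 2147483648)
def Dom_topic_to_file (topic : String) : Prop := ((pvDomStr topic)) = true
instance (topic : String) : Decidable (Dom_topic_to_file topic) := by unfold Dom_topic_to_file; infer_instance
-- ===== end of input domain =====

-- B replaces A's filter + repeated replace("__","_") while-loop + strip("_") with one
-- classification pass followed by a single split/join; equal return value on all inputs.

-- ===== PORT A =====
-- the 'while "__" in out: out = out.replace("__","_")' loop; each iteration shortens out,
-- so out.length iterations always suffice (fuel only makes the same computation total)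
def pvCollapse (fuel : Nat) (out : List Char) : List Char :=
  match fuel with
  | 0 => out
  | fuel + 1 =>
    if PySem.Chars.isIn ['_', '_'] out
    then pvCollapse fuel (PySem.Chars.replace out ['_', '_'] ['_'])
    else out

def topic_to_file (topic : String) : String :=
  let t := PySem.Chars.replace
      (PySem.Chars.join [' '] (PySem.Chars.split₀ (PySem.Chars.lower (PySem.Chars.strip topic.toList))))
      [' '] ['_']
  let out0 := t.filter (fun ch => PySem.Chars.isalnum ch || ch == '_')
  let out1 := pvCollapse out0.length out0
  let out2 := PySem.Chars.stripChars out1 ['_']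
  let out3 := if out2.isEmpty then "untitled".toList else out2
  String.ofList (out3 ++ ".txt".toList)

-- ===== PORT B =====
def topic_to_file_alt (topic : String) : String :=
  let cleaned := (PySem.Chars.lower topic.toList).foldl
      (fun acc ch =>
        if PySem.Chars.isalnum ch then acc ++ [ch]
        else if ch == '_' || PySem.Chars.isspace ch then acc ++ [' ']
        else acc) []
  let out := PySem.Chars.join ['_'] (PySem.Chars.split₀ cleaned)
  String.ofList ((if out.isEmpty then "untitled".toList else out) ++ ".txt".toList)

-- ===== PRECONDITION & SPEC =====
def Spec_topic_to_file (topic : String) (out : String) : Prop := out = topic_to_file_alt topic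
instance (topic : String) (out : String) : Decidable (Spec_topic_to_file topic out) := by unfold Spec_topic_to_file; infer_instance

-- ===== CLAIM (what is proved, stated in full; the proofs are below) =====
def Claim_equal_topic_to_file : Prop := ∀ (topic : String), Dom_topic_to_file topic → Spec_topic_to_file topic (topic_to_file topic)

-- ===== LEMMAS AND PROOFS =====

-- character classes
def pAl (c : Char) : Bool := PySem.Chars.isalnum c
def pSp (c : Char) : Bool := PySem.Chars.isspace c
def pQ (c : Char) : Bool := !PySem.Chars.isspace c
def pP (c : Char) : Bool := PySem.Chars.isalnum c || c == '_'
def pKeep (c : Char) : Bool := pAl c || (c == '_' || pSp c)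
def pU (c : Char) : Bool := c == '_'
def hMap (c : Char) : Char := if pAl c then c else ' '
def fCl (c : Char) : Option Char :=
  if PySem.Chars.isalnum c then some c
  else if c == '_' || PySem.Chars.isspace c then some ' ' else none
def subSp (c : Char) : Char := if c = ' ' then '_' else c

theorem charLe (a b : Char) : a ≤ b ↔ a.toNat ≤ b.toNat := ge_iff_le

theorem pAl_not_sp (c : Char) (h : pAl c = true) : pSp c = false := by
  have e1 : 'A'.toNat = 65 := rfl
  have e2 : 'Z'.toNat = 90 := rfl
  have e3 : 'a'.toNat = 97 := rfl
  have e4 : 'z'.toNat = 122 := rfl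
  have e5 : '0'.toNat = 48 := rfl
  have e6 : '9'.toNat = 57 := rfl
  simp only [pAl, PySem.Chars.isalnum, PySem.Chars.isalpha, PySem.Chars.isupper,
    PySem.Chars.islower, PySem.Chars.isdigit, Bool.or_eq_true, Bool.and_eq_true,
    decide_eq_true_iff, charLe, e1, e2, e3, e4, e5, e6] at h
  simp only [pSp, PySem.Chars.isspace, Bool.or_eq_false_iff, Bool.and_eq_false_iff,
    decide_eq_false_iff_not]
  omega

theorem pSp_not_al (c : Char) (h : pSp c = true) : pAl c = false := by
  by_contra hc
  have := pAl_not_sp c (by revert hc; cases pAl c <;> simp)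
  rw [this] at h; cases h

theorem pAl_und : pAl '_' = false := by decide
theorem pAl_ne_und {c : Char} (h : pAl c = true) : c ≠ '_' := by
  intro e; rw [e, pAl_und] at h; cases h

-- runsP: the maximal runs of p-characters of a list, in order
def runsP (p : Char → Bool) : List Char → List (List Char)
  | [] => []
  | c :: t => if p c then (c :: t.takeWhile p) :: runsP p (t.dropWhile p) else runsP p t
termination_by l => l.length
decreasing_by
  · exact Nat.lt_succ_of_le (List.length_dropWhile_le p t)
  · exact Nat.lt_succ_self _

theorem runsP_nil (p : Char → Bool) : runsP p [] = [] := by simp [runsP]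
theorem runsP_cons_pos (p : Char → Bool) (c : Char) (t : List Char) (h : p c = true) :
    runsP p (c :: t) = (c :: t.takeWhile p) :: runsP p (t.dropWhile p) := by
  rw [runsP]; simp [h]
theorem runsP_cons_neg (p : Char → Bool) (c : Char) (t : List Char) (h : p c = false) :
    runsP p (c :: t) = runsP p t := by
  rw [runsP]; simp [h]

theorem takeWhile_append_neg {p : Char → Bool} {b : Char} (hb : p b = false) (x y : List Char) :
    (x ++ b :: y).takeWhile p = x.takeWhile p := by
  induction x with
  | nil => simp [List.takeWhile, hb]
  | cons c x ih => cases hc : p c <;> simp [List.takeWhile_cons, hc, ih]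

theorem dropWhile_append_neg {p : Char → Bool} {b : Char} (hb : p b = false) (x y : List Char) :
    (x ++ b :: y).dropWhile p = x.dropWhile p ++ b :: y := by
  induction x with
  | nil => simp [List.dropWhile, hb]
  | cons c x ih => cases hc : p c <;> simp [List.dropWhile_cons, hc, ih]

theorem runsP_eq_nil {p : Char → Bool} {l : List Char} (h : ∀ c ∈ l, p c = false) :
    runsP p l = [] := by
  induction l with
  | nil => exact runsP_nil p
  | cons c t ih =>
      rw [runsP_cons_neg p c t (h c (List.mem_cons_self))]
      exact ih fun d hd => h d (List.mem_cons_of_mem _ hd)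

theorem mem_runsP {p : Char → Bool} {l w : List Char} (hw : w ∈ runsP p l) :
    w ≠ [] ∧ ∀ c ∈ w, p c = true := by
  induction l using runsP.induct p with
  | case1 => rw [runsP_nil] at hw; cases hw
  | case2 c t hc ih =>
      rw [runsP_cons_pos p c t hc] at hw
      rcases List.mem_cons.mp hw with h | h
      · subst h
        refine ⟨by simp, ?_⟩
        intro d hd
        rcases List.mem_cons.mp hd with h | h
        · subst h; exact hc
        · exact List.mem_takeWhile_imp h
      · exact ih h
  | case3 c t hc ih =>
      rw [runsP_cons_neg p c t (by revert hc; cases p c <;> simp)] at hw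
      exact ih hw

theorem runsP_append_neg_left {p : Char → Bool} {s : List Char} (h : ∀ c ∈ s, p c = false)
    (l : List Char) : runsP p (s ++ l) = runsP p l := by
  induction s with
  | nil => rfl
  | cons c s ih =>
      rw [List.cons_append, runsP_cons_neg p _ _ (h c (List.mem_cons_self))]
      exact ih fun d hd => h d (List.mem_cons_of_mem _ hd)

theorem runsP_append_sep {p : Char → Bool} {b : Char} (hb : p b = false) (x y : List Char) :
    runsP p (x ++ b :: y) = runsP p x ++ runsP p y := by
  induction x using runsP.induct p with
  | case1 => simp [runsP_nil, runsP_cons_neg p b y hb]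
  | case2 c t hc ih =>
      rw [List.cons_append, runsP_cons_pos p c _ hc, runsP_cons_pos p c t hc,
        takeWhile_append_neg hb, dropWhile_append_neg hb, ih]
      simp
  | case3 c t hc ih =>
      have hc' : p c = false := by revert hc; cases p c <;> simp
      rw [List.cons_append, runsP_cons_neg p c _ hc', runsP_cons_neg p c t hc', ih]

theorem runsP_append_neg_right {p : Char → Bool} {s : List Char} (h : ∀ c ∈ s, p c = false)
    (l : List Char) : runsP p (l ++ s) = runsP p l := by
  cases s with
  | nil => simp
  | cons b s =>
      rw [runsP_append_sep (h b List.mem_cons_self) l s,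
        runsP_eq_nil fun d hd => h d (List.mem_cons_of_mem _ hd), List.append_nil]

theorem takeWhile_congr' {p r : Char → Bool} {l : List Char} (h : ∀ c ∈ l, p c = r c) :
    l.takeWhile p = l.takeWhile r := by
  induction l with
  | nil => rfl
  | cons c t ih =>
      have hc := h c List.mem_cons_self
      cases hpc : p c <;>
        simp [List.takeWhile_cons, hpc, ← hc, ih fun d hd => h d (List.mem_cons_of_mem _ hd)]

theorem dropWhile_congr' {p r : Char → Bool} {l : List Char} (h : ∀ c ∈ l, p c = r c) :
    l.dropWhile p = l.dropWhile r := by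
  induction l with
  | nil => rfl
  | cons c t ih =>
      have hc := h c List.mem_cons_self
      cases hpc : p c <;>
        simp [List.dropWhile_cons, hpc, ← hc, ih fun d hd => h d (List.mem_cons_of_mem _ hd)]

theorem runsP_congr {p r : Char → Bool} {l : List Char} (h : ∀ c ∈ l, p c = r c) :
    runsP p l = runsP r l := by
  induction l using runsP.induct p with
  | case1 => simp [runsP_nil]
  | case2 c t hc ih =>
      have ht : ∀ d ∈ t, p d = r d := fun d hd => h d (List.mem_cons_of_mem _ hd)
      have hrc : r c = true := (h c List.mem_cons_self) ▸ hc
      rw [runsP_cons_pos p c t hc, runsP_cons_pos r c t hrc,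
        ih fun d hd => ht d ((List.dropWhile_sublist (p := p) (l := t)).subset hd),
        takeWhile_congr' ht, dropWhile_congr' ht]
  | case3 c t hc ih =>
      have hc' : p c = false := by revert hc; cases p c <;> simp
      have hrc : r c = false := (h c List.mem_cons_self) ▸ hc'
      rw [runsP_cons_neg p c t hc', runsP_cons_neg r c t hrc,
        ih fun d hd => h d (List.mem_cons_of_mem _ hd)]

theorem runsP_map {p : Char → Bool} {h : Char → Char} (h1 : ∀ c, p (h c) = p c)
    (h2 : ∀ c, p c = true → h c = c) (l : List Char) :
    runsP p (l.map h) = runsP p l := by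
  induction l using runsP.induct p with
  | case1 => simp
  | case2 c t hc ih =>
      have hph : p (h c) = true := (h1 c).trans hc
      have etw : (t.map h).takeWhile p = t.takeWhile p := by
        rw [List.takeWhile_map, takeWhile_congr' (p := p ∘ h) (r := p) fun d _ => h1 d]
        exact (List.map_congr_left fun d hd => h2 d (List.mem_takeWhile_imp hd)).trans
          (List.map_id _)
      have edw : (t.map h).dropWhile p = (t.dropWhile p).map h := by
        rw [List.dropWhile_map, dropWhile_congr' (p := p ∘ h) (r := p) fun d _ => h1 d]
      rw [List.map_cons, runsP_cons_pos p _ _ hph, runsP_cons_pos p c t hc, h2 c hc,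
        etw, edw, ih]
  | case3 c t hc ih =>
      have hc' : p c = false := by revert hc; cases p c <;> simp
      have hph : p (h c) = false := (h1 c).trans hc'
      rw [List.map_cons, runsP_cons_neg p _ _ hph, runsP_cons_neg p c t hc', ih]

theorem inter_nil (b : Char) : List.intercalate [b] ([] : List (List Char)) = [] := by
  simp [List.intercalate]

theorem inter_single (b : Char) (x : List Char) : List.intercalate [b] [x] = x := by
  simp [List.intercalate]

theorem inter_cons_cons (b : Char) (x y : List Char) (l : List (List Char)) :
    List.intercalate [b] (x :: y :: l) = x ++ b :: List.intercalate [b] (y :: l) := by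
  simp [List.intercalate, List.intersperse]

theorem map_inter {g : Char → Char} {b b' : Char} (hg : g b = b') (vs : List (List Char)) :
    (List.intercalate [b] vs).map g = List.intercalate [b'] (vs.map (List.map g)) := by
  induction vs with
  | nil => simp [inter_nil]
  | cons x vs ih =>
      cases vs with
      | nil => simp [inter_single]
      | cons y l => simp [inter_cons_cons, hg, ih]

theorem filter_inter {p' : Char → Bool} {b : Char} (hb : p' b = true) (vs : List (List Char)) :
    (List.intercalate [b] vs).filter p' = List.intercalate [b] (vs.map (List.filter p')) := by
  induction vs with
  | nil => simp [inter_nil]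
  | cons x vs ih =>
      cases vs with
      | nil => simp [inter_single]
      | cons y l => simp [inter_cons_cons, hb, ih]

theorem runsP_inter {p : Char → Bool} {b : Char} (hb : p b = false) (vs : List (List Char)) :
    runsP p (List.intercalate [b] vs) = vs.flatMap (runsP p) := by
  induction vs with
  | nil => simp [inter_nil, runsP_nil]
  | cons x vs ih =>
      cases vs with
      | nil => simp [inter_single]
      | cons y l => rw [inter_cons_cons, runsP_append_sep hb, ih]; simp

theorem mem_inter {b c : Char} {vs : List (List Char)} (hc : c ∈ List.intercalate [b] vs) :
    c = b ∨ ∃ w ∈ vs, c ∈ w := by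
  induction vs with
  | nil => rw [inter_nil] at hc; cases hc
  | cons x vs ih =>
      cases vs with
      | nil =>
          rw [inter_single] at hc
          exact Or.inr ⟨x, List.mem_cons_self, hc⟩
      | cons y l =>
          rw [inter_cons_cons] at hc
          rcases List.mem_append.mp hc with h | h
          · exact Or.inr ⟨x, List.mem_cons_self, h⟩
          · rcases List.mem_cons.mp h with h | h
            · exact Or.inl h
            · rcases ih h with h | ⟨w, hw, hcw⟩
              · exact Or.inl h
              · exact Or.inr ⟨w, List.mem_cons_of_mem _ hw, hcw⟩

theorem inter_ne_nil {b : Char} {w : List Char} {vs : List (List Char)} (hw : w ≠ []) :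
    List.intercalate [b] (w :: vs) ≠ [] := by
  cases vs with
  | nil => rw [inter_single]; exact hw
  | cons y l => rw [inter_cons_cons]; simp

theorem split0_go_eq (u : List Char) : ∀ cur acc,
    PySem.Chars.split₀.go u cur acc = acc.reverse ++
      (if cur.isEmpty then runsP pQ u
       else (cur.reverse ++ u.takeWhile pQ) :: runsP pQ (u.dropWhile pQ)) := by
  induction u with
  | nil =>
      intro cur acc
      rw [PySem.Chars.split₀.go]
      cases cur <;> simp [runsP_nil]
  | cons c rest ih =>
      intro cur acc
      rw [PySem.Chars.split₀.go]
      by_cases hsp : PySem.Chars.isspace c = true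
      · have hq : pQ c = false := by simp [pQ, hsp]
        rw [if_pos hsp]
        cases cur with
        | nil =>
            simp only [List.isEmpty_nil, if_true, ih]
            simp [runsP_cons_neg pQ c rest hq]
        | cons d cur' =>
            simp only [List.isEmpty_cons, if_false, Bool.false_eq_true, ih]
            simp [runsP_cons_neg pQ c rest hq, List.takeWhile_cons, List.dropWhile_cons, hq]
      · have hsp' : PySem.Chars.isspace c = false := by revert hsp; cases PySem.Chars.isspace c <;> simp
        have hq : pQ c = true := by simp [pQ, hsp']
        rw [if_neg hsp, ih]
        simp only [List.isEmpty_cons, Bool.false_eq_true, if_false, List.reverse_cons]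
        cases cur <;>
          simp [runsP_cons_pos pQ c rest hq, List.takeWhile_cons, List.dropWhile_cons, hq]

theorem split0_eq_runs (u : List Char) : PySem.Chars.split₀ u = runsP pQ u := by
  rw [PySem.Chars.split₀, split0_go_eq]
  simp

-- one textual pass of out.replace("__", "_")
def rep1 : List Char → List Char
  | [] => []
  | [c] => [c]
  | c :: d :: t => if c = '_' ∧ d = '_' then '_' :: rep1 t else c :: rep1 (d :: t)

def hasDD : List Char → Bool
  | c :: d :: t => (decide (c = '_') && decide (d = '_')) || hasDD (d :: t)
  | _ => false

-- the full collapse of underscore runs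
def squeezeU : List Char → List Char
  | [] => []
  | [c] => [c]
  | c :: d :: t => if c = '_' ∧ d = '_' then squeezeU (d :: t) else c :: squeezeU (d :: t)

theorem replace_go_pair (fuel : Nat) : ∀ (u acc : List Char), u.length ≤ fuel →
    PySem.Chars.replace.go ['_', '_'] ['_'] fuel u acc = acc.reverse ++ rep1 u := by
  induction fuel with
  | zero =>
      intro u acc h
      have : u = [] := List.length_eq_zero_iff.mp (Nat.le_zero.mp h)
      subst this
      rw [PySem.Chars.replace.go]
      simp [rep1]
  | succ fuel ih =>
      intro u acc h
      match u with
      | [] => rw [PySem.Chars.replace.go] <;> simp [rep1]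
      | c :: t =>
          rw [PySem.Chars.replace.go]
          by_cases hp : List.isPrefixOf ['_', '_'] (c :: t) = true
          · rcases t with _ | ⟨d, t'⟩
            · simp [List.isPrefixOf] at hp
            · have hc0 : '_' = c ∧ '_' = d := by
                simpa [List.isPrefixOf] using hp
              have hc : c = '_' ∧ d = '_' := ⟨hc0.1.symm, hc0.2.symm⟩
              rw [if_pos hp]
              have hlen : t'.length ≤ fuel := by
                simp at h; omega
              rw [show List.drop (List.length ['_', '_']) (c :: d :: t') = t' by simp, ih t' _ hlen]
              simp [rep1, hc.1, hc.2]
          · rw [if_neg hp]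
            have hlen : t.length ≤ fuel := by simp at h; omega
            rw [ih t _ hlen]
            have : rep1 (c :: t) = c :: rep1 t := by
              rcases t with _ | ⟨d, t'⟩
              · rfl
              · have : ¬(c = '_' ∧ d = '_') := by
                  intro hcd
                  exact hp (by simp [List.isPrefixOf, hcd.1, hcd.2])
                simp [rep1, this]
            rw [this]
            simp

theorem replace_pair (u : List Char) : PySem.Chars.replace u ['_', '_'] ['_'] = rep1 u := by
  rw [PySem.Chars.replace]
  simp only [List.isEmpty_cons, Bool.false_eq_true, if_false]
  rw [replace_go_pair u.length u [] le_rfl]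
  simp

theorem replace_go_single (fuel : Nat) : ∀ (u acc : List Char), u.length ≤ fuel →
    PySem.Chars.replace.go [' '] ['_'] fuel u acc = acc.reverse ++ u.map subSp := by
  induction fuel with
  | zero =>
      intro u acc h
      have : u = [] := List.length_eq_zero_iff.mp (Nat.le_zero.mp h)
      subst this
      rw [PySem.Chars.replace.go]
      simp
  | succ fuel ih =>
      intro u acc h
      match u with
      | [] => rw [PySem.Chars.replace.go] <;> simp
      | c :: t =>
          rw [PySem.Chars.replace.go]
          have hlen : t.length ≤ fuel := by simp at h; omega
          by_cases hp : List.isPrefixOf [' '] (c :: t) = true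
          · have hc0 : ' ' = c := by simpa [List.isPrefixOf] using hp
            have hc : c = ' ' := hc0.symm
            rw [if_pos hp, show List.drop (List.length [' ']) (c :: t) = t by simp, ih t _ hlen]
            simp [subSp, hc]
          · have hc : ¬ c = ' ' := fun e => hp (by simp [List.isPrefixOf, e])
            rw [if_neg hp, ih t _ hlen]
            simp [subSp, hc]

theorem replace_single (u : List Char) : PySem.Chars.replace u [' '] ['_'] = u.map subSp := by
  rw [PySem.Chars.replace]
  simp only [List.isEmpty_cons, Bool.false_eq_true, if_false]
  rw [replace_go_single u.length u [] le_rfl]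
  simp

theorem hasDD_iff_infix (u : List Char) : hasDD u = true ↔ ['_', '_'] <:+: u := by
  induction u with
  | nil => simp [hasDD]
  | cons c t ih =>
      rw [List.infix_cons_iff]
      cases t with
      | nil =>
          simp only [hasDD]
          constructor
          · intro h; cases h
          · rintro (h | h)
            · rcases h with ⟨r, hr⟩; simp at hr
            · simp at h
      | cons d t' =>
          simp only [hasDD, Bool.or_eq_true, Bool.and_eq_true, decide_eq_true_iff]
          rw [ih]
          constructor
          · rintro (⟨h1, h2⟩ | h)
            · exact Or.inl ⟨t', by rw [h1, h2]; rfl⟩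
            · exact Or.inr h
          · rintro (⟨r, hr⟩ | h)
            · rcases hr with hr
              injection hr with e1 hr
              injection hr with e2 _
              exact Or.inl ⟨e1.symm, e2.symm⟩
            · exact Or.inr h

theorem isIn_eq_hasDD (u : List Char) : PySem.Chars.isIn ['_', '_'] u = hasDD u := by
  cases h : hasDD u
  · rw [PySem.Chars.isIn_eq_false_iff _ _]
    intro hin
    rw [← hasDD_iff_infix] at hin
    rw [h] at hin; cases hin
  · exact (PySem.Chars.isIn_iff_infix _ _).mpr ((hasDD_iff_infix u).mp h)

theorem squeeze_of_not_hasDD {u : List Char} (h : hasDD u = false) : squeezeU u = u := by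
  induction u with
  | nil => rfl
  | cons c t ih =>
      cases t with
      | nil => rfl
      | cons d t' =>
          simp only [hasDD, Bool.or_eq_false_iff, Bool.and_eq_false_iff,
            decide_eq_false_iff_not] at h
          have hnd : ¬(c = '_' ∧ d = '_') := by
            rcases h.1 with h1 | h1
            · exact fun hcd => h1 hcd.1
            · exact fun hcd => h1 hcd.2
          simp only [squeezeU, if_neg hnd]
          rw [ih (by simpa [hasDD] using h.2)]

theorem rep1_head (c : Char) (t : List Char) : ∃ t', rep1 (c :: t) = c :: t' := by
  cases t with
  | nil => exact ⟨[], rfl⟩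
  | cons d t' =>
      by_cases h : c = '_' ∧ d = '_'
      · exact ⟨rep1 t', by simp [rep1, h, h.1]⟩
      · exact ⟨rep1 (d :: t'), by simp [rep1, h]⟩

theorem squeeze_rep1 (u : List Char) : squeezeU (rep1 u) = squeezeU u := by
  have H : ∀ n (u : List Char), u.length ≤ n → squeezeU (rep1 u) = squeezeU u := by
    intro n
    induction n with
    | zero =>
        intro u h
        have : u = [] := List.length_eq_zero_iff.mp (Nat.le_zero.mp h)
        subst this; rfl
    | succ n ih =>
        intro u h
        match u with
        | [] => rfl
        | [c] => rfl
        | c :: d :: t =>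
            by_cases hcd : c = '_' ∧ d = '_'
            · rcases hcd with ⟨hc, hd⟩
              subst hc; subst hd
              have e1 : rep1 ('_' :: '_' :: t) = '_' :: rep1 t := by simp [rep1]
              have e2 : squeezeU ('_' :: '_' :: t) = squeezeU ('_' :: t) := by simp [squeezeU]
              rw [e1, e2]
              cases t with
              | nil => rfl
              | cons e t' =>
                  rcases rep1_head e t' with ⟨t'', ht⟩
                  have hre : squeezeU (e :: t'') = squeezeU (e :: t') := by
                    rw [← ht, ih (e :: t') (by simp at h ⊢; omega)]
                  rw [ht]
                  by_cases he : e = '_'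
                  · subst he
                    have e3 : squeezeU ('_' :: '_' :: t'') = squeezeU ('_' :: t'') := by
                      simp [squeezeU]
                    have e4 : squeezeU ('_' :: '_' :: t') = squeezeU ('_' :: t') := by
                      simp [squeezeU]
                    rw [e3, e4]
                    exact hre
                  · have e3 : squeezeU ('_' :: e :: t'') = '_' :: squeezeU (e :: t'') := by
                      simp [squeezeU, he]
                    have e4 : squeezeU ('_' :: e :: t') = '_' :: squeezeU (e :: t') := by
                      simp [squeezeU, he]
                    rw [e3, e4, hre]
            · have e1 : rep1 (c :: d :: t) = c :: rep1 (d :: t) := by simp [rep1, hcd]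
              rcases rep1_head d t with ⟨t'', ht⟩
              have hre : squeezeU (d :: t'') = squeezeU (d :: t) := by
                rw [← ht, ih (d :: t) (by simp at h ⊢; omega)]
              have e2 : squeezeU (c :: d :: t'') = c :: squeezeU (d :: t'') := by
                simp [squeezeU, hcd]
              have e3 : squeezeU (c :: d :: t) = c :: squeezeU (d :: t) := by
                simp [squeezeU, hcd]
              rw [e1, ht, e2, e3, hre]
  exact H u.length u le_rfl

theorem rep1_length_le (u : List Char) : (rep1 u).length ≤ u.length := by
  have H : ∀ n (u : List Char), u.length ≤ n → (rep1 u).length ≤ u.length := by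
    intro n
    induction n with
    | zero => intro u h; have : u = [] := List.length_eq_zero_iff.mp (Nat.le_zero.mp h); subst this; simp [rep1]
    | succ n ih =>
        intro u h
        match u with
        | [] => simp [rep1]
        | [c] => simp [rep1]
        | c :: d :: t =>
            by_cases hcd : c = '_' ∧ d = '_'
            · simp only [rep1, if_pos hcd]
              have := ih t (by simp at h ⊢; omega)
              simp; omega
            · simp only [rep1, if_neg hcd]
              have := ih (d :: t) (by simp at h ⊢; omega)
              simp at this ⊢; omega
  exact H u.length u le_rfl

theorem rep1_length_lt {u : List Char} (h : hasDD u = true) : (rep1 u).length < u.length := by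
  induction u with
  | nil => simp [hasDD] at h
  | cons c t ih =>
      cases t with
      | nil => simp [hasDD] at h
      | cons d t' =>
          by_cases hcd : c = '_' ∧ d = '_'
          · simp only [rep1, if_pos hcd]
            have := rep1_length_le t'
            simp; omega
          · simp only [rep1, if_neg hcd]
            simp only [hasDD, Bool.or_eq_true, Bool.and_eq_true, decide_eq_true_iff] at h
            rcases h with h | h
            · exact absurd h hcd
            · have := ih h
              simp at this ⊢; omega

theorem collapse_eq_squeeze (fuel : Nat) : ∀ u : List Char, u.length ≤ fuel →
    pvCollapse fuel u = squeezeU u := by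
  induction fuel with
  | zero =>
      intro u h
      have : u = [] := List.length_eq_zero_iff.mp (Nat.le_zero.mp h)
      subst this; rfl
  | succ fuel ih =>
      intro u h
      rw [pvCollapse, isIn_eq_hasDD]
      cases hdd : hasDD u
      · simp only [Bool.false_eq_true, if_false]
        exact (squeeze_of_not_hasDD hdd).symm
      · simp only [if_true]
        rw [replace_pair, ih (rep1 u) (by have := rep1_length_lt hdd; omega), squeeze_rep1]

def rstripU (v : List Char) : List Char := (v.reverse.dropWhile pU).reverse

theorem contains_eq_pU (c : Char) : (['_'] : List Char).contains c = pU c := by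
  rw [List.contains_cons]
  simp [pU]

theorem stripChars_eq (s : List Char) :
    PySem.Chars.stripChars s ['_'] = rstripU (s.dropWhile pU) := by
  rw [PySem.Chars.stripChars, rstripU]
  rw [dropWhile_congr' (r := pU) fun d _ => contains_eq_pU d,
    dropWhile_congr' (r := pU) fun d _ => contains_eq_pU d]

theorem rstripU_nil : rstripU [] = [] := rfl

theorem rstripU_cons_ne {c : Char} (hc : c ≠ '_') (v : List Char) :
    rstripU (c :: v) = c :: rstripU v := by
  rw [rstripU, List.reverse_cons, List.dropWhile_append]
  by_cases h : (v.reverse.dropWhile pU).isEmpty = true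
  · rw [if_pos h]
    have : rstripU v = [] := by
      rw [rstripU, List.isEmpty_iff.mp h]; rfl
    rw [this]
    have hb : (c == '_') = false := by simpa using hc
    simp [List.dropWhile, pU, hb]
  · rw [if_neg h]
    simp [rstripU]

theorem rstripU_cons_und (v : List Char) :
    rstripU ('_' :: v) = if rstripU v = [] then [] else '_' :: rstripU v := by
  rw [rstripU, List.reverse_cons, List.dropWhile_append]
  by_cases h : (v.reverse.dropWhile pU).isEmpty = true
  · rw [if_pos h]
    have hv : rstripU v = [] := by rw [rstripU, List.isEmpty_iff.mp h]; rfl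
    rw [if_pos hv]
    simp [List.dropWhile, pU]
  · rw [if_neg h]
    have hv : rstripU v ≠ [] := by
      rw [rstripU]
      intro he
      exact h (by rw [List.isEmpty_iff, ← List.reverse_reverse (List.dropWhile pU v.reverse), he]; rfl)
    rw [if_neg hv]
    simp [rstripU]

def udPre (t : List Char) : List Char :=
  if t.head? = some '_' ∧ t.any pAl then ['_'] else []

theorem runsP_nil_all {p : Char → Bool} {l : List Char} (h : runsP p l = []) :
    ∀ c ∈ l, p c = false := by
  induction l using runsP.induct p with
  | case1 => intro c hc; cases hc
  | case2 c t hc ih => rw [runsP_cons_pos p c t hc] at h; cases h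
  | case3 c t hc ih =>
      have hc' : p c = false := by revert hc; cases p c <;> simp
      rw [runsP_cons_neg p c t hc'] at h
      intro d hd
      rcases List.mem_cons.mp hd with h' | h'
      · subst h'; exact hc'
      · exact ih h d h'

theorem runsP_ne_nil_of_any {l : List Char} (h : l.any pAl = true) : runsP pAl l ≠ [] := by
  intro he
  rcases List.any_eq_true.mp h with ⟨c, hc, hpc⟩
  rw [runsP_nil_all he c hc] at hpc; cases hpc

theorem inter_runs_ne_nil {t : List Char} (h : t.any pAl = true) :
    List.intercalate ['_'] (runsP pAl t) ≠ [] := by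
  rcases hr : runsP pAl t with _ | ⟨w, vs⟩
  · exact absurd hr (runsP_ne_nil_of_any h)
  · exact inter_ne_nil (mem_runsP (hr ▸ List.mem_cons_self)).1

theorem inter_cons_elem (a : Char) (w : List Char) (rs : List (List Char)) :
    a :: List.intercalate ['_'] (w :: rs) = List.intercalate ['_'] ((a :: w) :: rs) := by
  cases rs with
  | nil => rw [inter_single, inter_single]
  | cons y l => rw [inter_cons_cons, inter_cons_cons]; rfl

theorem glue {a : Char} {t : List Char} (hP : ∀ c ∈ t, pP c = true) (ha : pAl a = true) :
    a :: (udPre t ++ List.intercalate ['_'] (runsP pAl t)) =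
      List.intercalate ['_'] (runsP pAl (a :: t)) := by
  rw [runsP_cons_pos pAl a t ha]
  cases t with
  | nil => simp [udPre, runsP_nil, inter_nil, inter_single]
  | cons b t' =>
      by_cases hb : pAl b = true
      · have hbu : b ≠ '_' := pAl_ne_und hb
        have hud : udPre (b :: t') = [] := by
          simp [udPre, hbu]
        rw [hud, List.nil_append, runsP_cons_pos pAl b t' hb, inter_cons_elem,
          List.takeWhile_cons_of_pos hb, List.dropWhile_cons_of_pos hb]
      · have hb' : pAl b = false := by revert hb; cases pAl b <;> simp
        have hbu : b = '_' := by
          have hm := hP b List.mem_cons_self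
          rcases (Bool.or_eq_true _ _).mp hm with h | h
          · have hbt : pAl b = true := h
            rw [hb'] at hbt; cases hbt
          · exact eq_of_beq h
        subst hbu
        rw [List.takeWhile_cons_of_neg (by rw [pAl_und]; simp),
          List.dropWhile_cons_of_neg (by rw [pAl_und]; simp)]
        by_cases hany : t'.any pAl = true
        · have hud : udPre ('_' :: t') = ['_'] := by
            simp [udPre, pAl_und, hany]
          have hrt : runsP pAl ('_' :: t') = runsP pAl t' := runsP_cons_neg pAl _ _ pAl_und
          rw [hud]
          rcases hr : runsP pAl t' with _ | ⟨w, vs⟩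
          · exact absurd hr (runsP_ne_nil_of_any hany)
          · rw [hrt, hr, inter_cons_cons]
            rfl
        · have hall : ∀ c ∈ t', pAl c = false := by
            intro c hc
            by_contra hcc
            exact hany (List.any_eq_true.mpr ⟨c, hc, by revert hcc; cases pAl c <;> simp⟩)
          have hany' : ('_' :: t').any pAl = false := by
            rw [List.any_cons, pAl_und, Bool.false_or]
            revert hany; cases t'.any pAl <;> simp
          have hud : udPre ('_' :: t') = [] := by
            simp [udPre, hany']
          have hrt : runsP pAl ('_' :: t') = [] := by
            rw [runsP_cons_neg pAl _ _ pAl_und]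
            exact runsP_eq_nil hall
          rw [hud, hrt, inter_nil, inter_single]
          rfl

theorem squeezeU_cons_ne {c : Char} (hc : c ≠ '_') (t : List Char) :
    squeezeU (c :: t) = c :: squeezeU t := by
  cases t with
  | nil => rfl
  | cons d t' =>
      rw [show squeezeU (c :: d :: t') =
        (if c = '_' ∧ d = '_' then squeezeU (d :: t') else c :: squeezeU (d :: t')) from rfl,
        if_neg (fun h => hc h.1)]

theorem squeezeU_dd (t : List Char) : squeezeU ('_' :: '_' :: t) = squeezeU ('_' :: t) := by
  simp [squeezeU]

theorem squeezeU_und_ne {d : Char} (hd : d ≠ '_') (t : List Char) :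
    squeezeU ('_' :: d :: t) = '_' :: squeezeU (d :: t) := by
  rw [show squeezeU ('_' :: d :: t) =
    (if '_' = '_' ∧ d = '_' then squeezeU (d :: t) else '_' :: squeezeU (d :: t)) from rfl,
    if_neg (fun h => hd h.2)]

theorem k1 (n : Nat) : ∀ u : List Char, u.length ≤ n → (∀ c ∈ u, pP c = true) →
    rstripU (squeezeU u) = udPre u ++ List.intercalate ['_'] (runsP pAl u) := by
  induction n with
  | zero =>
      intro u h _
      have : u = [] := List.length_eq_zero_iff.mp (Nat.le_zero.mp h)
      subst this
      simp [squeezeU, rstripU_nil, udPre, runsP_nil, inter_nil]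
  | succ n ih =>
      intro u h hP
      match u with
      | [] => simp [squeezeU, rstripU_nil, udPre, runsP_nil, inter_nil]
      | c :: t =>
          have hPt : ∀ d ∈ t, pP d = true := fun d hd => hP d (List.mem_cons_of_mem _ hd)
          have hlt : t.length ≤ n := by simp at h; omega
          by_cases hc : c = '_'
          · subst hc
            match t with
            | [] =>
                rw [show squeezeU ['_'] = ['_'] from rfl, rstripU_cons_und, rstripU_nil]
                simp [udPre, pAl_und, runsP_cons_neg pAl _ _ pAl_und, runsP_nil, inter_nil]
            | d :: t' =>
                by_cases hd : d = '_'
                · subst hd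
                  rw [squeezeU_dd, ih ('_' :: t') (by simp at h ⊢; omega) hPt]
                  have e1 : udPre ('_' :: '_' :: t') = udPre ('_' :: t') := by
                    simp [udPre, List.any_cons, pAl_und]
                  rw [e1, show runsP pAl ('_' :: '_' :: t') = runsP pAl ('_' :: t') from
                    runsP_cons_neg pAl _ _ pAl_und]
                · have hda : pAl d = true := by
                    have hm := hPt d List.mem_cons_self
                    rcases (Bool.or_eq_true _ _).mp hm with h' | h'
                    · exact h'
                    · exact absurd (eq_of_beq h') hd
                  rw [squeezeU_und_ne hd, rstripU_cons_und,
                    ih (d :: t') hlt hPt]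
                  have hud : udPre (d :: t') = [] := by
                    simp [udPre, hd]
                  rw [hud, List.nil_append]
                  have hne : List.intercalate ['_'] (runsP pAl (d :: t')) ≠ [] :=
                    inter_runs_ne_nil (by rw [List.any_cons, hda, Bool.true_or])
                  rw [if_neg hne]
                  have e2 : udPre ('_' :: d :: t') = ['_'] := by
                    simp [udPre, List.any_cons, hda]
                  rw [e2, runsP_cons_neg pAl _ _ pAl_und]
                  rfl
          · have hca : pAl c = true := by
              have hm := hP c List.mem_cons_self
              rcases (Bool.or_eq_true _ _).mp hm with h' | h'
              · exact h'
              · exact absurd (eq_of_beq h') hc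
            rw [squeezeU_cons_ne hc, rstripU_cons_ne hc, ih t hlt hPt]
            have hud : udPre (c :: t) = [] := by
              simp [udPre, hc]
            rw [hud, List.nil_append, glue hPt hca]

theorem kMain (n : Nat) : ∀ u : List Char, u.length ≤ n → (∀ c ∈ u, pP c = true) →
    rstripU ((squeezeU u).dropWhile pU) = List.intercalate ['_'] (runsP pAl u) := by
  induction n with
  | zero =>
      intro u h _
      have : u = [] := List.length_eq_zero_iff.mp (Nat.le_zero.mp h)
      subst this
      simp [squeezeU, rstripU_nil, runsP_nil, inter_nil]
  | succ n ih =>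
      intro u h hP
      match u with
      | [] => simp [squeezeU, rstripU_nil, runsP_nil, inter_nil]
      | c :: t =>
          have hPt : ∀ d ∈ t, pP d = true := fun d hd => hP d (List.mem_cons_of_mem _ hd)
          have hlt : t.length ≤ n := by simp at h; omega
          by_cases hc : c = '_'
          · subst hc
            match t with
            | [] =>
                rw [show squeezeU ['_'] = ['_'] from rfl]
                simp [List.dropWhile, pU, rstripU_nil,
                  runsP_cons_neg pAl _ _ pAl_und, runsP_nil, inter_nil]
            | d :: t' =>
                by_cases hd : d = '_'
                · subst hd
                  rw [squeezeU_dd, runsP_cons_neg pAl _ _ pAl_und]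
                  exact ih ('_' :: t') (by simp at h ⊢; omega) hPt
                · rw [squeezeU_und_ne hd,
                    List.dropWhile_cons_of_pos (by simp [pU]),
                    runsP_cons_neg pAl _ _ pAl_und]
                  have : rstripU ((squeezeU (d :: t')).dropWhile pU) =
                      List.intercalate ['_'] (runsP pAl (d :: t')) := ih (d :: t') hlt hPt
                  exact this
          · have hca : pAl c = true := by
              have hm := hP c List.mem_cons_self
              rcases (Bool.or_eq_true _ _).mp hm with h' | h'
              · exact h'
              · exact absurd (eq_of_beq h') hc
            rw [squeezeU_cons_ne hc,
              List.dropWhile_cons_of_neg (by simp [pU, hc]),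
              rstripU_cons_ne hc, k1 n t hlt hPt]
            rw [← glue hPt hca]

theorem dropWhile_head_neg {p : Char → Bool} {t : List Char} {b : Char} {r : List Char}
    (h : t.dropWhile p = b :: r) : p b = false := by
  induction t with
  | nil => cases h
  | cons c t' ih =>
      rw [List.dropWhile_cons] at h
      by_cases hc : p c = true
      · rw [if_pos hc] at h; exact ih h
      · have hc' : p c = false := by revert hc; cases p c <;> simp
        rw [if_neg (by rw [hc']; simp)] at h
        injection h with h1 _
        rw [← h1]; exact hc'

theorem pKeep_eq_pP {c : Char} (h : pSp c = false) : pKeep c = pP c := by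
  simp only [pKeep, pP, pAl, h, Bool.or_false]

theorem bigN (n : Nat) : ∀ L : List Char, L.length ≤ n →
    runsP pAl (L.filter pKeep) =
      (runsP pQ L).flatMap (fun w => runsP pAl (w.filter pP)) := by
  induction n with
  | zero =>
      intro L h
      have : L = [] := List.length_eq_zero_iff.mp (Nat.le_zero.mp h)
      subst this
      simp [runsP_nil]
  | succ n ih =>
      intro L h
      match L with
      | [] => simp [runsP_nil]
      | c :: t =>
          by_cases hq : pQ c = true
          · have hsp : pSp c = false := by
              revert hq; simp [pQ, pSp]
            have hw : ∀ d ∈ c :: t.takeWhile pQ, pQ d = true := by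
              intro d hd
              rcases List.mem_cons.mp hd with h' | h'
              · subst h'; exact hq
              · exact List.mem_takeWhile_imp h'
            have hwf : ∀ d ∈ c :: t.takeWhile pQ, pKeep d = pP d := by
              intro d hd
              have := hw d hd
              exact pKeep_eq_pP (by revert this; simp [pQ, pSp])
            have hsplitw : (c :: t.takeWhile pQ).filter pKeep =
                (c :: t.takeWhile pQ).filter pP := List.filter_congr hwf
            rw [runsP_cons_pos pQ c t hq]
            have hdecomp : c :: t = (c :: t.takeWhile pQ) ++ t.dropWhile pQ := by
              rw [List.cons_append, List.takeWhile_append_dropWhile]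
            rw [hdecomp, List.filter_append, hsplitw]
            rcases hr : t.dropWhile pQ with _ | ⟨b, r'⟩
            · simp [runsP_nil]
            · have hqb : pQ b = false := dropWhile_head_neg hr
              have hspb : pSp b = true := by
                revert hqb; simp [pQ, pSp]
              have halb : pAl b = false := pSp_not_al b hspb
              have hkb : pKeep b = true := by simp [pKeep, hspb]
              have hlen : (t.dropWhile pQ).length ≤ n := by
                have h1 := List.length_dropWhile_le pQ t
                simp at h; omega
              have hih := ih (t.dropWhile pQ) hlen
              rw [hr] at hih
              rw [show List.filter pKeep (b :: r') = b :: List.filter pKeep r' by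
                simp [hkb]]
              rw [runsP_append_sep halb, List.flatMap_cons]
              congr 1
              rw [← hih, show List.filter pKeep (b :: r') = b :: List.filter pKeep r' by
                simp [hkb], runsP_cons_neg pAl b _ halb]
          · have hq' : pQ c = false := by revert hq; cases pQ c <;> simp
            have hsp : pSp c = true := by revert hq'; simp [pQ, pSp]
            have hk : pKeep c = true := by simp [pKeep, hsp]
            rw [runsP_cons_neg pQ c t hq',
              show List.filter pKeep (c :: t) = c :: List.filter pKeep t by
                simp [hk],
              runsP_cons_neg pAl c _ (pSp_not_al c hsp)]
            exact ih t (by simp at h; omega)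

theorem pSp_lowerChar (c : Char) : pSp (PySem.Chars.lowerChar c) = pSp c := by
  rw [PySem.Chars.lowerChar]
  by_cases hu : PySem.Chars.isupper c = true
  · rw [if_pos hu]
    have hb : 'A'.toNat ≤ c.toNat ∧ c.toNat ≤ 'Z'.toNat := by
      simpa [PySem.Chars.isupper, Bool.and_eq_true, decide_eq_true_iff, charLe] using hu
    have e1 : 'A'.toNat = 65 := rfl
    have e2 : 'Z'.toNat = 90 := rfl
    have hvalid : (c.toNat + 32).isValidChar := by
      left; omega
    have htn : (Char.ofNat (c.toNat + 32)).toNat = c.toNat + 32 := by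
      rw [Char.toNat_ofNat, if_pos hvalid]
    have hl : pSp (Char.ofNat (c.toNat + 32)) = false := by
      simp only [pSp, PySem.Chars.isspace, htn, Bool.or_eq_false_iff, Bool.and_eq_false_iff,
        decide_eq_false_iff_not]
      omega
    have hr : pSp c = false := by
      simp only [pSp, PySem.Chars.isspace, Bool.or_eq_false_iff, Bool.and_eq_false_iff,
        decide_eq_false_iff_not]
      omega
    rw [hl, hr]
  · rw [if_neg hu]

theorem lower_strip (s : List Char) :
    PySem.Chars.lower (PySem.Chars.strip s) = PySem.Chars.strip (PySem.Chars.lower s) := by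
  have hdw : ∀ u : List Char,
      (u.map PySem.Chars.lowerChar).dropWhile PySem.Chars.isspace =
        (u.dropWhile PySem.Chars.isspace).map PySem.Chars.lowerChar := by
    intro u
    rw [List.dropWhile_map]
    congr 1
    exact dropWhile_congr' fun d _ => pSp_lowerChar d
  rw [PySem.Chars.strip, PySem.Chars.strip, PySem.Chars.lower, PySem.Chars.lower,
    PySem.Chars.lstrip, PySem.Chars.rstrip, PySem.Chars.rstrip, PySem.Chars.lstrip,
    List.map_reverse, hdw, ← List.map_reverse, ← List.map_reverse, hdw, List.map_reverse]

theorem filter_eq_self_of_sp {u : List Char} (h : ∀ c ∈ u, pSp c = true) :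
    u.filter pKeep = u := by
  refine List.filter_eq_self.mpr fun c hc => ?_
  simp [pKeep, h c hc]

theorem runs_filter_strip (L : List Char) :
    runsP pAl ((PySem.Chars.strip L).filter pKeep) = runsP pAl (L.filter pKeep) := by
  have hsl : ∀ c ∈ L.takeWhile PySem.Chars.isspace, pSp c = true :=
    fun c hc => List.mem_takeWhile_imp hc
  have hL : L = L.takeWhile PySem.Chars.isspace ++ L.dropWhile PySem.Chars.isspace :=
    (List.takeWhile_append_dropWhile).symm
  set u := L.dropWhile PySem.Chars.isspace with hu
  have hsr : ∀ c ∈ (u.reverse.takeWhile PySem.Chars.isspace).reverse, pSp c = true := by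
    intro c hc
    exact List.mem_takeWhile_imp (List.mem_reverse.mp hc)
  have hu2 : u = (u.reverse.dropWhile PySem.Chars.isspace).reverse ++
      (u.reverse.takeWhile PySem.Chars.isspace).reverse := by
    have := (List.takeWhile_append_dropWhile
      (p := PySem.Chars.isspace) (l := u.reverse)).symm
    calc u = u.reverse.reverse := (List.reverse_reverse u).symm
    _ = (u.reverse.takeWhile PySem.Chars.isspace ++
          u.reverse.dropWhile PySem.Chars.isspace).reverse := by rw [← this]
    _ = _ := by rw [List.reverse_append]
  have hstrip : PySem.Chars.strip L = (u.reverse.dropWhile PySem.Chars.isspace).reverse := by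
    rw [PySem.Chars.strip, PySem.Chars.lstrip, PySem.Chars.rstrip, hu]
  conv_rhs => rw [hL]
  rw [List.filter_append, filter_eq_self_of_sp hsl,
    runsP_append_neg_left (fun c hc => pSp_not_al c (hsl c hc))]
  conv_rhs => rw [hu2]
  rw [List.filter_append, filter_eq_self_of_sp hsr,
    runsP_append_neg_right (fun c hc => pSp_not_al c (hsr c hc)), hstrip]

theorem foldl_step_eq (l : List Char) : ∀ acc : List Char,
    l.foldl (fun acc ch =>
      if PySem.Chars.isalnum ch then acc ++ [ch]
      else if ch == '_' || PySem.Chars.isspace ch then acc ++ [' ']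
      else acc) acc = acc ++ l.filterMap fCl := by
  induction l with
  | nil => intro acc; simp
  | cons c t ih =>
      intro acc
      rw [List.foldl_cons, List.filterMap_cons, ih]
      by_cases h1 : PySem.Chars.isalnum c = true
      · simp [fCl, h1]
      · by_cases h2 : (c == '_' || PySem.Chars.isspace c) = true
        · simp [fCl, h1, h2]
        · simp [fCl, h1, h2]

theorem filterMap_fCl (l : List Char) : l.filterMap fCl = (l.filter pKeep).map hMap := by
  induction l with
  | nil => rfl
  | cons c t ih =>
      rw [List.filterMap_cons, List.filter_cons]
      by_cases h1 : pAl c = true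
      · have : fCl c = some c := by simp [fCl, pAl] at h1 ⊢; simp [h1]
        rw [this]
        have hk : pKeep c = true := by simp [pKeep, h1]
        rw [if_pos hk, List.map_cons, ih]
        have : hMap c = c := by simp [hMap, h1]
        rw [this]
      · have h1' : pAl c = false := by revert h1; cases pAl c <;> simp
        by_cases h2 : (c == '_' || pSp c) = true
        · have : fCl c = some ' ' := by
            simp only [fCl]
            rw [if_neg (by simp [pAl] at h1'; simp [h1']), if_pos (by simpa [pSp] using h2)]
          rw [this]
          have hk : pKeep c = true := by simp [pKeep, h1']; simpa using h2
          rw [if_pos hk, List.map_cons, ih]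
          have : hMap c = ' ' := by simp [hMap, h1']
          rw [this]
        · have : fCl c = none := by
            simp only [fCl]
            rw [if_neg (by simp [pAl] at h1'; simp [h1']), if_neg (by simpa [pSp] using h2)]
          rw [this]
          have hk : pKeep c = false := by
            have h2' : (c == '_' || pSp c) = false := by
              revert h2; cases (c == '_' || pSp c) <;> simp
            simp [pKeep, h1', h2']
          rw [if_neg (by rw [hk]; simp), ih]

theorem subSp_run {w : List Char} (hw : ∀ c ∈ w, pQ c = true) : w.map subSp = w := by
  have : ∀ c ∈ w, subSp c = c := by
    intro c hc
    have hq := hw c hc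
    have hne : c ≠ ' ' := by
      intro he
      rw [he] at hq
      have : pQ ' ' = false := by decide
      rw [this] at hq; cases hq
    simp [subSp, hne]
  exact (List.map_congr_left this).trans (List.map_id w)

theorem core_eq (topic : String) : topic_to_file topic = topic_to_file_alt topic := by
  simp only [topic_to_file, topic_to_file_alt]
  have hlow : PySem.Chars.lower (PySem.Chars.strip topic.toList) =
      PySem.Chars.strip (PySem.Chars.lower topic.toList) := lower_strip _
  set L0 := PySem.Chars.lower topic.toList with hL0
  set m := PySem.Chars.strip L0 with hm
  set ws := runsP pQ m with hws
  -- A side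
  have h1 : PySem.Chars.split₀ m = ws := split0_eq_runs m
  have hwq : ∀ w ∈ ws, ∀ c ∈ w, pQ c = true := fun w hw => (mem_runsP hw).2
  have h4 : (List.intercalate [' '] ws).map subSp = List.intercalate ['_'] (ws.map (List.map subSp)) :=
    map_inter (by simp [subSp]) ws
  have h5 : ws.map (List.map subSp) = ws := by
    refine (List.map_congr_left fun w hw => subSp_run (hwq w hw)).trans (List.map_id ws)
  have hA1 : PySem.Chars.replace (PySem.Chars.join [' '] (PySem.Chars.split₀
      (PySem.Chars.lower (PySem.Chars.strip topic.toList)))) [' '] ['_'] =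
      List.intercalate ['_'] ws := by
    rw [hlow, h1, show PySem.Chars.join [' '] ws = List.intercalate [' '] ws from rfl,
      replace_single, h4, h5]
  rw [hA1]
  have hfil : (List.intercalate ['_'] ws).filter (fun ch => PySem.Chars.isalnum ch || ch == '_') =
      List.intercalate ['_'] (ws.map (List.filter pP)) := by
    rw [show (fun ch => PySem.Chars.isalnum ch || ch == '_') = pP from rfl]
    exact filter_inter (by decide) ws
  rw [hfil]
  set out0 := List.intercalate ['_'] (ws.map (List.filter pP)) with hout0
  have hP0 : ∀ c ∈ out0, pP c = true := by
    intro c hc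
    rcases mem_inter hc with h | ⟨w, hw, hcw⟩
    · rw [h]; decide
    · rcases List.mem_map.mp hw with ⟨w', _, rfl⟩
      exact (List.mem_filter.mp hcw).2
  rw [collapse_eq_squeeze out0.length out0 le_rfl, stripChars_eq,
    kMain out0.length out0 le_rfl hP0]
  have h10 : runsP pAl out0 = runsP pAl (L0.filter pKeep) := by
    rw [hout0, runsP_inter pAl_und, List.flatMap_map, ← bigN m.length m le_rfl, hm,
      runs_filter_strip]
  rw [h10]
  -- B side
  have hB1 : L0.foldl (fun acc ch =>
      if PySem.Chars.isalnum ch then acc ++ [ch]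
      else if ch == '_' || PySem.Chars.isspace ch then acc ++ [' ']
      else acc) [] = (L0.filter pKeep).map hMap := by
    rw [foldl_step_eq L0 [], List.nil_append, filterMap_fCl]
  rw [hB1, split0_eq_runs]
  have hB2 : runsP pQ ((L0.filter pKeep).map hMap) = runsP pAl ((L0.filter pKeep).map hMap) := by
    refine runsP_congr fun c hc => ?_
    rcases List.mem_map.mp hc with ⟨d, _, rfl⟩
    by_cases hd : pAl d = true
    · have hsp : pSp d = false := pAl_not_sp d hd
      have hq : pQ d = true := by
        simp only [pQ]
        rw [show PySem.Chars.isspace d = false from hsp]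
        rfl
      have he : hMap d = d := by simp [hMap, hd]
      rw [he, hq, hd]
    · have hd' : pAl d = false := by revert hd; cases pAl d <;> simp
      have he : hMap d = ' ' := by simp [hMap, hd']
      rw [he]
      decide
  have hB3 : runsP pAl ((L0.filter pKeep).map hMap) = runsP pAl (L0.filter pKeep) := by
    refine runsP_map (fun c => ?_) (fun c hc => by simp [hMap, hc]) _
    by_cases hc : pAl c = true
    · simp [hMap, hc]
    · have hc' : pAl c = false := by revert hc; cases pAl c <;> simp
      simp [hMap, hc']
      decide
  rw [hB2, hB3,
    show PySem.Chars.join ['_'] (runsP pAl (L0.filter pKeep)) =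
      List.intercalate ['_'] (runsP pAl (L0.filter pKeep)) from rfl]

-- ===== VERDICT (by name: the statement is the Claim_ definition above) =====
theorem topic_to_file_spec : Claim_equal_topic_to_file := by
  intro topic _
  unfold Spec_topic_to_file
  exact core_eq topic
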